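-- pv_equiv track=rewrite | github.com/rachellehmbs/boolean-lwr | anf_lwr_utils.py | multiple_binary_sum
-- ===== SOURCE A (Python) =====
-- def binary_sum(x, y):
--     """ Compute the binary representation of the integer sum of two integers x and y of the same length q.
--     Also works if x and y are replaced by vectors of Boolean polynomials.
--     :param x: The first vector.
--     :param y: The second vector.
--     :return: The binary sum of x and y.
--     """
--     assert len(x) == len(y)
--     q = len(x)
--     c = [0 for _ in range(q)]  # c stands for carry
--     bin_sum = [0 for _ in range(q)]
--
--     for i in range(q):
--         if i > 0:
--             c[i] = x[i-1]*y[i-1] + x[i-1]*c[i-1] + y[i-1]*c[i-1]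
--         bin_sum[i] = x[i] + y[i] + c[i]
--     return bin_sum
--
-- def multiple_binary_sum(list_of_words):
--     """ Compute the binary representation of the integer sum of a list of integers
--      of the same length q.
--      Also works if each element is replaced by a vector of Boolean polynomials."""
--     length = len(list_of_words)
--     assert all([len(x) == len(list_of_words[0]) for x in list_of_words])
--     if length == 1:
--         return list_of_words[0]
--     elif length == 2:
--         return binary_sum(list_of_words[0], list_of_words[1])
--     else:
--         first_half = multiple_binary_sum(list_of_words[:length//2])
--         second_half = multiple_binary_sum(list_of_words[length // 2:])
--         return binary_sum(first_half, second_half)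
-- ===== SOURCE B (Python) =====
-- def _add_words(x, y):
--     out = []
--     c = 0
--     for xi, yi in zip(x, y):
--         out.append(xi + yi + c)
--         c = xi * yi + xi * c + yi * c
--     return out
--
-- def multiple_binary_sum(list_of_words):
--     """ Compute the binary representation of the integer sum of a list of integers
--      of the same length q, by an iterative post-order evaluation (explicit stack)
--      of the same midpoint-split combination tree."""
--     assert all([len(x) == len(list_of_words[0]) for x in list_of_words])
--     ops = [("split", list_of_words)]
--     vals = []
--     while ops:
--         tag, arg = ops.pop()
--         if tag == "split":
--             n = len(arg)
--             if n == 1: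
--                 vals.append(arg[0])
--             elif n == 2:
--                 vals.append(_add_words(arg[0], arg[1]))
--             else:
--                 ops.append(("comb", None))
--                 ops.append(("split", arg[n // 2:]))
--                 ops.append(("split", arg[:n // 2]))
--         else:
--             b = vals.pop()
--             a = vals.pop()
--             vals.append(_add_words(a, b))
--     return vals[0]
-- ===== Notes on version B (the rewrite author's own statement) =====
-- stated objective: alternative
-- what changed: The divide-and-conquer recursion is replaced by an iterative explicit-stack post-order evaluation of the same midpoint-split tree, and the carry/array-based binary_sum by a one-pass zip adder carrying a single running carry value.
import Mathlib
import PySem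

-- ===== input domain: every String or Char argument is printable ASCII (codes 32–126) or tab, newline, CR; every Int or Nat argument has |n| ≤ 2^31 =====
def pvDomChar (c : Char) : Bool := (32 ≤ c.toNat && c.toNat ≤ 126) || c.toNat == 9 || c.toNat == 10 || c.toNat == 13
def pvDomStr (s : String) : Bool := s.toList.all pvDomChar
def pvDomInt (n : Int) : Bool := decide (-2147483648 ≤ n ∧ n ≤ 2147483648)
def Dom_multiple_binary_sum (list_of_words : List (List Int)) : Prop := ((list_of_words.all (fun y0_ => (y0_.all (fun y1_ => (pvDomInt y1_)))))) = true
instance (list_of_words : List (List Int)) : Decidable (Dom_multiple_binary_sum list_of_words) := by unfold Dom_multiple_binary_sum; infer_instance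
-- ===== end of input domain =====

-- B replaces A's divide-and-conquer recursion with an explicit-stack post-order evaluation of the
-- same midpoint-split tree and a one-pass single-carry adder: a different decomposition, same cost.


-- ===== PORT A =====
-- binary_sum: the loop keeps the two arrays c and bin_sum exactly as the Python does, writing
-- c[i] and bin_sum[i] with List.set; indices are in range on Pre_ inputs, so getD 0 is exact.
def bstep (x y : List Int) (p : List Int × List Int) (i : Nat) : List Int × List Int :=
  let c := if 0 < i then
      p.1.set i (x.getD (i-1) 0 * y.getD (i-1) 0 + x.getD (i-1) 0 * p.1.getD (i-1) 0
                 + y.getD (i-1) 0 * p.1.getD (i-1) 0)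
    else p.1
  (c, p.2.set i (x.getD i 0 + y.getD i 0 + c.getD i 0))

def binary_sum (x y : List Int) : List Int :=
  let q := x.length
  ((List.range q).foldl (bstep x y) (List.replicate q 0, List.replicate q 0)).2

-- A's recursion, totalized with a fuel parameter; fuel = length suffices (each recursive call
-- strictly shortens the list when length ≥ 3), and on the empty list Python never terminates.
-- xs[:k] / xs[k:] with 0 ≤ k ≤ len xs are exactly take/drop.
def multiple_binary_sum_go : Nat → List (List Int) → List Int
  | 0, _ => []
  | fuel+1, L =>
    let length := L.length
    if length = 1 then L.getD 0 []
    else if length = 2 then binary_sum (L.getD 0 []) (L.getD 1 [])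
    else binary_sum (multiple_binary_sum_go fuel (L.take (length/2)))
                    (multiple_binary_sum_go fuel (L.drop (length/2)))

def multiple_binary_sum (list_of_words : List (List Int)) : List Int :=
  multiple_binary_sum_go list_of_words.length list_of_words

-- ===== PORT B =====
-- one-pass zip adder with a single running carry (Source B's _add_words)
def pyadd : List Int → List Int → Int → List Int
  | xi :: xs, yi :: ys, c => (xi + yi + c) :: pyadd xs ys (xi * yi + xi * c + yi * c)
  | _, _, _ => []

inductive Op where
  | split : List (List Int) → Op
  | comb : Op

-- Source B's while loop over the explicit ops/vals stacks; the head of each list is the stack top.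
-- The while loop is totalized with fuel; 3*length steps always suffice on Pre_ inputs.
def runB : Nat → List Op → List (List Int) → List (List Int)
  | 0, _, vals => vals
  | _+1, [], vals => vals
  | fuel+1, Op.split arg :: ops, vals =>
      let n := arg.length
      if n = 1 then runB fuel ops (arg.getD 0 [] :: vals)
      else if n = 2 then runB fuel ops (pyadd (arg.getD 0 []) (arg.getD 1 []) 0 :: vals)
      else runB fuel (Op.split (arg.take (n/2)) :: Op.split (arg.drop (n/2)) :: Op.comb :: ops) vals
  | fuel+1, Op.comb :: ops, vals =>
      match vals with
      | b :: a :: vs => runB fuel ops (pyadd a b 0 :: vs)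
      | vs => vs

def multiple_binary_sum_alt (list_of_words : List (List Int)) : List Int :=
  (runB (3 * list_of_words.length) [Op.split list_of_words] []).getD 0 []

-- ===== PRECONDITION & SPEC =====
-- Pre_ excludes the empty list (A recurses forever: RecursionError) and lists whose words have
-- unequal lengths (A's assert raises AssertionError); on every other input A returns normally.
def Pre_multiple_binary_sum (list_of_words : List (List Int)) : Prop :=
  list_of_words ≠ [] ∧ ∀ w ∈ list_of_words, w.length = (list_of_words.headD []).length
instance (list_of_words : List (List Int)) : Decidable (Pre_multiple_binary_sum list_of_words) := by
  unfold Pre_multiple_binary_sum; infer_instance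

def pvWitness_multiple_binary_sum : List (List Int) := [[1, 0, 1], [0, 1, 1], [1, 1, 0]]

def Spec_multiple_binary_sum (list_of_words : List (List Int)) (out : List Int) : Prop := out = multiple_binary_sum_alt list_of_words
instance (list_of_words : List (List Int)) (out : List Int) : Decidable (Spec_multiple_binary_sum list_of_words out) := by unfold Spec_multiple_binary_sum; infer_instance

-- ===== CLAIM (what is proved, stated in full; the proofs are below) =====
def Claim_equal_multiple_binary_sum : Prop := ∀ (list_of_words : List (List Int)), Dom_multiple_binary_sum list_of_words → Pre_multiple_binary_sum list_of_words → Spec_multiple_binary_sum list_of_words (multiple_binary_sum list_of_words)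

-- ===== LEMMAS AND PROOFS =====

-- carry sequence of the one-pass adder
def carryAux : List Int → List Int → Int → Nat → Int
  | x :: xs, y :: ys, c, j+1 => carryAux xs ys (x * y + x * c + y * c) j
  | _, _, c, _ => c

lemma carryAux_succ : ∀ (j : Nat) (x y : List Int) (c : Int), j < x.length → j < y.length →
    carryAux x y c (j+1) =
      x.getD j 0 * y.getD j 0 + x.getD j 0 * carryAux x y c j + y.getD j 0 * carryAux x y c j := by
  intro j
  induction j with
  | zero =>
    intro x y c hx hy
    cases x with
    | nil => simp at hx
    | cons a xs =>
      cases y with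
      | nil => simp at hy
      | cons b ys => simp [carryAux]
  | succ j ih =>
    intro x y c hx hy
    cases x with
    | nil => simp at hx
    | cons a xs =>
      cases y with
      | nil => simp at hy
      | cons b ys =>
        have := ih xs ys (a * b + a * c + b * c) (by simpa using Nat.lt_of_succ_lt_succ hx)
          (by simpa using Nat.lt_of_succ_lt_succ hy)
        simpa [carryAux] using this

lemma pyadd_spec : ∀ (x y : List Int) (c : Int), y.length = x.length →
    pyadd x y c = (List.range x.length).map (fun j => x.getD j 0 + y.getD j 0 + carryAux x y c j) := by
  intro x
  induction x with
  | nil => intro y c h; cases y <;> simp_all [pyadd]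
  | cons a xs ih =>
    intro y c h
    cases y with
    | nil => simp at h
    | cons b ys =>
      have hy : ys.length = xs.length := by simpa using h
      simp only [pyadd, List.length_cons, List.range_succ_eq_map, List.map_cons, List.map_map]
      refine List.cons_eq_cons.mpr ⟨by simp [carryAux], ?_⟩
      rw [ih ys (a * b + a * c + b * c) hy]
      apply List.map_congr_left
      intro j hj
      simp [carryAux]

lemma pyadd_length : ∀ (x y : List Int) (c : Int), (pyadd x y c).length = min x.length y.length := by
  intro x
  induction x with
  | nil => intro y c; cases y <;> simp [pyadd]
  | cons a xs ih =>
    intro y c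
    cases y with
    | nil => simp [pyadd]
    | cons b ys => simp [pyadd, ih]

lemma map_range_set (q k : Nat) (f : Nat → Int) (v : Int) (_hk : k < q) :
    ((List.range q).map f).set k v = (List.range q).map (fun j => if j = k then v else f j) := by
  apply List.ext_getElem
  · simp
  · intro i h1 h2
    simp only [List.getElem_set, List.getElem_map, List.getElem_range]
    by_cases h : k = i
    · subst h; simp
    · rw [if_neg h, if_neg (fun hh => h hh.symm)]

lemma map_range_getD (q k : Nat) (f : Nat → Int) (hk : k < q) :
    ((List.range q).map f).getD k 0 = f k := by
  rw [List.getD_eq_getElem?_getD]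
  simp [hk]

-- invariant of A's binary_sum loop after the first k iterations
lemma binary_sum_inv (x y : List Int) (h : y.length = x.length) :
    ∀ k, k ≤ x.length →
    (List.range k).foldl (bstep x y) (List.replicate x.length 0, List.replicate x.length 0)
    = ((List.range x.length).map (fun j => if j < k then carryAux x y 0 j else 0),
       (List.range x.length).map (fun j => if j < k then x.getD j 0 + y.getD j 0 + carryAux x y 0 j else 0)) := by
  intro k
  induction k with
  | zero =>
    intro _
    simp [List.map_const']
  | succ k ih =>
    intro hk
    have hk' : k ≤ x.length := Nat.le_of_succ_le hk
    have hkq : k < x.length := hk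
    rw [List.range_succ, List.foldl_append, ih hk']
    simp only [List.foldl_cons, List.foldl_nil, bstep]
    have hc : (if 0 < k then
        ((List.range x.length).map (fun j => if j < k then carryAux x y 0 j else 0)).set k
          (x.getD (k-1) 0 * y.getD (k-1) 0
            + x.getD (k-1) 0 * (((List.range x.length).map (fun j => if j < k then carryAux x y 0 j else 0)).getD (k-1) 0)
            + y.getD (k-1) 0 * (((List.range x.length).map (fun j => if j < k then carryAux x y 0 j else 0)).getD (k-1) 0))
      else ((List.range x.length).map (fun j => if j < k then carryAux x y 0 j else 0)))
        = (List.range x.length).map (fun j => if j < k + 1 then carryAux x y 0 j else 0) := by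
      by_cases h0 : 0 < k
      · have hk1 : k - 1 < x.length := by omega
        rw [if_pos h0, map_range_getD _ _ _ hk1, map_range_set _ _ _ _ hkq]
        apply List.map_congr_left
        intro j hj
        have hlt : k - 1 < k := by omega
        by_cases hjk : j = k
        · rw [if_pos hjk, if_pos (show j < k + 1 by omega), hjk]
          have hs := carryAux_succ (k-1) x y 0 (by omega) (by omega)
          rw [show k - 1 + 1 = k by omega] at hs
          rw [if_pos hlt]
          exact hs.symm
        · have : (j < k) ↔ (j < k + 1) := by omega
          simp [hjk, this]
      · have hk0 : k = 0 := by omega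
        subst hk0
        rw [if_neg h0]
        apply List.map_congr_left
        intro j hj
        by_cases hj0 : j = 0
        · subst hj0; cases x <;> cases y <;> simp [carryAux]
        · have h1 : ¬ j < 0 := by omega
          have h2 : ¬ j < 1 := by omega
          simp [h1, h2]
    rw [hc]
    refine Prod.ext rfl ?_
    have hg : ((List.range x.length).map (fun j => if j < k + 1 then carryAux x y 0 j else 0)).getD k 0
        = carryAux x y 0 k := by
      rw [map_range_getD _ _ _ hkq]; simp
    simp only [hg]
    rw [map_range_set _ _ _ _ hkq]
    apply List.map_congr_left
    intro j hj
    by_cases hjk : j = k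
    · subst hjk; simp
    · have : (j < k) ↔ (j < k + 1) := by omega
      simp [hjk, this]

lemma binary_sum_eq_pyadd (x y : List Int) (h : y.length = x.length) :
    binary_sum x y = pyadd x y 0 := by
  show ((List.range x.length).foldl (bstep x y) (List.replicate x.length 0, List.replicate x.length 0)).2 = _
  rw [binary_sum_inv x y h x.length (Nat.le_refl _), pyadd_spec x y 0 h]
  apply List.map_congr_left
  intro j hj
  simp at hj
  simp [hj]

-- the reference tree: A's midpoint-split combination tree with the one-pass adder
def refT (L : List (List Int)) : List Int :=
  if L.length = 1 then L.getD 0 []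
  else if L.length = 2 then pyadd (L.getD 0 []) (L.getD 1 []) 0
  else if h0 : L.length ≤ 2 then []
  else pyadd (refT (L.take (L.length/2))) (refT (L.drop (L.length/2))) 0
termination_by L.length
decreasing_by
  · simp only [List.length_take]; omega
  · simp only [List.length_drop]; omega

lemma refT_length : ∀ (n : Nat) (L : List (List Int)) (q : Nat), L.length ≤ n → 1 ≤ L.length →
    (∀ w ∈ L, w.length = q) → (refT L).length = q := by
  intro n
  induction n with
  | zero => intro L q h h1 _; omega
  | succ n ih =>
    intro L q hn h1 hq
    rw [refT]
    by_cases e1 : L.length = 1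
    · rw [if_pos e1]
      cases L with
      | nil => simp at e1
      | cons a t => exact hq a (by simp)
    · rw [if_neg e1]
      by_cases e2 : L.length = 2
      · rw [if_pos e2]
        cases L with
        | nil => simp at e2
        | cons a t =>
          cases t with
          | nil => simp at e2
          | cons b t' =>
            rw [pyadd_length]
            simp only [List.getD_cons_succ, List.getD_cons_zero]
            rw [hq a (by simp), hq b (by simp)]
            simp
      · rw [if_neg e2]
        have h3 : 2 < L.length := by omega
        rw [dif_neg (by omega)]
        have ht : (L.take (L.length/2)).length = L.length/2 := by simp; omega
        have hd : (L.drop (L.length/2)).length = L.length - L.length/2 := by simp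
        have r1 := ih (L.take (L.length/2)) q (by omega) (by omega)
          (fun w hw => hq w (List.take_subset _ _ hw))
        have r2 := ih (L.drop (L.length/2)) q (by omega) (by omega)
          (fun w hw => hq w (List.drop_subset _ _ hw))
        rw [pyadd_length, r1, r2]
        simp

-- A's fueled recursion computes the reference tree
lemma goA_eq_refT : ∀ (f : Nat) (L : List (List Int)) (q : Nat), L.length ≤ f → 1 ≤ L.length →
    (∀ w ∈ L, w.length = q) → multiple_binary_sum_go f L = refT L := by
  intro f
  induction f with
  | zero => intro L q h h1 _; omega
  | succ f ih =>
    intro L q hf h1 hq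
    rw [refT]
    simp only [multiple_binary_sum_go]
    by_cases e1 : L.length = 1
    · simp [e1]
    · rw [if_neg e1, if_neg e1]
      by_cases e2 : L.length = 2
      · rw [if_pos e2, if_pos e2]
        cases L with
        | nil => simp at e2
        | cons a t =>
          cases t with
          | nil => simp at e2
          | cons b t' =>
            have : t' = [] := by
              cases t' with
              | nil => rfl
              | cons _ _ => simp at e2
            subst this
            exact binary_sum_eq_pyadd a b (by rw [hq a (by simp), hq b (by simp)])
      · rw [if_neg e2, if_neg e2]
        have h3 : 2 < L.length := by omega
        rw [dif_neg (by omega)]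
        have ht : (L.take (L.length/2)).length = L.length/2 := by simp; omega
        have hd : (L.drop (L.length/2)).length = L.length - L.length/2 := by simp
        have hqt : ∀ w ∈ L.take (L.length/2), w.length = q :=
          fun w hw => hq w (List.take_subset _ _ hw)
        have hqd : ∀ w ∈ L.drop (L.length/2), w.length = q :=
          fun w hw => hq w (List.drop_subset _ _ hw)
        rw [ih (L.take (L.length/2)) q (by omega) (by omega) hqt,
            ih (L.drop (L.length/2)) q (by omega) (by omega) hqd]
        exact binary_sum_eq_pyadd _ _ (by
          rw [refT_length L.length _ q (by omega) (by omega) hqt,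
              refT_length L.length _ q (by omega) (by omega) hqd])

-- simulation: processing one split frame consumes exactly some u ≤ 3*|L| - 2 steps
-- and pushes the reference-tree value of L
lemma runB_sim : ∀ (n : Nat) (L : List (List Int)), L.length ≤ n → 1 ≤ L.length →
    ∃ u, u ≤ 3 * L.length - 2 ∧ ∀ (fuel : Nat) (ops : List Op) (vals : List (List Int)),
      runB (u + fuel) (Op.split L :: ops) vals = runB fuel ops (refT L :: vals) := by
  intro n
  induction n with
  | zero => intro L h h1; omega
  | succ n ih =>
    intro L hn h1
    by_cases e1 : L.length = 1
    · refine ⟨1, by omega, ?_⟩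
      intro fuel ops vals
      simp only [Nat.add_comm 1 fuel]
      rw [refT]
      simp [runB, e1]
    · by_cases e2 : L.length = 2
      · refine ⟨1, by omega, ?_⟩
        intro fuel ops vals
        simp only [Nat.add_comm 1 fuel]
        rw [refT]
        simp [runB, e1, e2]
      · have h3 : 2 < L.length := by omega
        have ht : (L.take (L.length/2)).length = L.length/2 := by simp; omega
        have hd : (L.drop (L.length/2)).length = L.length - L.length/2 := by simp
        obtain ⟨u1, hu1, hs1⟩ := ih (L.take (L.length/2)) (by omega) (by omega)
        obtain ⟨u2, hu2, hs2⟩ := ih (L.drop (L.length/2)) (by omega) (by omega)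
        refine ⟨1 + u1 + u2 + 1, by omega, ?_⟩
        intro fuel ops vals
        have step1 : runB (1 + u1 + u2 + 1 + fuel) (Op.split L :: ops) vals
            = runB (u1 + (u2 + (1 + fuel)))
                (Op.split (L.take (L.length/2)) :: Op.split (L.drop (L.length/2)) :: Op.comb :: ops) vals := by
          have hf : 1 + u1 + u2 + 1 + fuel = (u1 + (u2 + (1 + fuel))) + 1 := by omega
          rw [hf]
          simp [runB, e1, e2]
        rw [step1, hs1, hs2]
        have step2 : runB (1 + fuel) (Op.comb :: ops)
            (refT (L.drop (L.length/2)) :: refT (L.take (L.length/2)) :: vals)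
            = runB fuel ops (pyadd (refT (L.take (L.length/2))) (refT (L.drop (L.length/2))) 0 :: vals) := by
          have : 1 + fuel = fuel + 1 := by omega
          rw [this]
          simp [runB]
        rw [step2]
        have hrefT : refT L = pyadd (refT (L.take (L.length/2))) (refT (L.drop (L.length/2))) 0 := by
          rw [refT, if_neg e1, if_neg e2, dif_neg (show ¬ L.length ≤ 2 by omega)]
        rw [hrefT]

lemma runB_nil : ∀ (f : Nat) (vals : List (List Int)), runB f [] vals = vals := by
  intro f vals
  cases f <;> simp [runB]

-- ===== VERDICT (by name: the statement is the Claim_ definition above) =====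
theorem multiple_binary_sum_spec : Claim_equal_multiple_binary_sum := by
  intro L _ hpre
  obtain ⟨hne, hq⟩ := hpre
  have h1 : 1 ≤ L.length := by
    cases L with
    | nil => exact absurd rfl hne
    | cons a t => simp
  unfold Spec_multiple_binary_sum multiple_binary_sum multiple_binary_sum_alt
  obtain ⟨u, hu, hs⟩ := runB_sim L.length L (Nat.le_refl _) h1
  have hfuel : 3 * L.length = u + (3 * L.length - u) := by omega
  rw [hfuel, hs, runB_nil]
  simp only [List.getD_cons_zero]
  exact goA_eq_refT L.length L (L.headD []).length (Nat.le_refl _) h1 hq
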